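-- pv_equiv track=rewrite | github.com/ewrfcas/Anime_Rec | inference_reviews.py | combine_indexs
-- ===== SOURCE A (Python) =====
-- def combine_indexs(idxs, gap=3, max_length=4):
--     res = []
--     for idx in idxs:
--         if len(res) == 0:
--             res.append([idx, idx])
--         elif len(res[-1]) < max_length and idx - res[-1][-1] < gap:
--             res[-1][-1] = idx
--         else:
--             res.append([idx, idx])
--     return res
-- ===== SOURCE B (Python) =====
-- def combine_indexs(idxs, gap=3, max_length=4):
--     xs = list(idxs)
--     if not xs:
--         return []
--     # a new run starts wherever two consecutive indices are at least `gap` apart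
--     brk = [b - a >= gap for a, b in zip(xs, xs[1:])]
--     firsts = [xs[0]] + [x for x, b in zip(xs[1:], brk) if b]
--     lasts = [x for x, b in zip(xs, brk + [True]) if b]
--     return [[f, l] for f, l in zip(firsts, lasts)]
-- ===== Notes on version B (the rewrite author's own statement) =====
-- stated objective: alternative
-- what changed: A grows a result list greedily, mutating the last group's endpoint in place and re-checking the last group's length each step; B computes the break flags between consecutive elements once and zips the run-first elements with the run-last elements into pairs.
-- intended difference: When max_length <= 2 and some adjacent indices are closer than gap, A returns every index as its own [i,i] pair (it compares max_length against the stored pair's constant length 2, so the merge branch never fires), while B merges by gap as the function's purpose dictates; since every group A keeps is a 2-element [first,last] pair, max_length never meaningfully limits a group and gap-based merging is the intended behaviour. — e.g. on combine_indexs([1, 2], 3, 2): A returns [[1, 1], [2, 2]], B returns [[1, 2]]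
import Mathlib
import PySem

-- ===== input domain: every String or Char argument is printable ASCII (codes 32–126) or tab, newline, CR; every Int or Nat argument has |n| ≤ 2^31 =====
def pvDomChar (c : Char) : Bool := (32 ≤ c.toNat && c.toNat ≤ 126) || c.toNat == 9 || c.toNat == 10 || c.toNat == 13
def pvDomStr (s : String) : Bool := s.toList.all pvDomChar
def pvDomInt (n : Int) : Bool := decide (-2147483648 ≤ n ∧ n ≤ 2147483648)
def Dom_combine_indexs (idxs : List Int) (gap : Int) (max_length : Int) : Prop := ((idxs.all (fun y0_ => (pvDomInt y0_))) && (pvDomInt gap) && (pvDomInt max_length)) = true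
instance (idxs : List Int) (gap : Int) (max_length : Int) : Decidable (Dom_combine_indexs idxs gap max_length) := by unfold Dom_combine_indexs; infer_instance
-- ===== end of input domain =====

-- B replaces A's grow-and-mutate loop by computing the break flags between neighbours once
-- and zipping the run-first with the run-last elements (alternative decomposition, same cost);
-- B merges purely by gap, see D_ below for the one condition on which that differs from A.

-- ===== PORT A =====
-- A's loop: res grows, res[-1][-1] is mutated on merge; ported as a foldl over the same state.
def combine_indexs (idxs : List Int) (gap : Int) (max_length : Int) : List (List Int) :=
  idxs.foldl (fun res idx =>
    if res.length = 0 then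
      res ++ [[idx, idx]]
    else
      let last := res.getLast?.getD []
      if (last.length : Int) < max_length ∧ idx - last.getLast?.getD 0 < gap then
        -- res[-1][-1] = idx
        res.dropLast ++ [last.dropLast ++ [idx]]
      else
        res ++ [[idx, idx]]) []

-- ===== PORT B =====
-- transliteration of Source B: brk flags, firsts, lasts, zipped into pairs
def combine_indexs_alt (idxs : List Int) (gap : Int) (max_length : Int) : List (List Int) :=
  match idxs with
  | [] => []
  | x :: rest =>
    let xs := x :: rest
    let brk : List Bool := (xs.zip rest).map (fun p => decide (p.2 - p.1 ≥ gap))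
    let firsts := x :: ((rest.zip brk).filterMap (fun p => if p.2 then some p.1 else none))
    let lasts := (xs.zip (brk ++ [true])).filterMap (fun p => if p.2 then some p.1 else none)
    (firsts.zip lasts).map (fun p => [p.1, p.2])

-- ===== PRECONDITION & SPEC =====
-- When max_length ≤ 2 and some adjacent indices are closer than gap, A returns every index as its
-- own [i,i] pair (it compares max_length with the stored pair's constant length 2, so the merge
-- branch never fires), while B merges by gap, which is the intended grouping behaviour.
def D_combine_indexs (idxs : List Int) (gap : Int) (max_length : Int) : Prop :=
  max_length ≤ 2 ∧ ((idxs.zip idxs.tail).any (fun p => decide (p.2 - p.1 < gap))) = true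
instance (idxs : List Int) (gap : Int) (max_length : Int) : Decidable (D_combine_indexs idxs gap max_length) := by unfold D_combine_indexs; infer_instance

def Spec_combine_indexs (idxs : List Int) (gap : Int) (max_length : Int) (out : List (List Int)) : Prop := ¬ D_combine_indexs idxs gap max_length → out = combine_indexs_alt idxs gap max_length
instance (idxs : List Int) (gap : Int) (max_length : Int) (out : List (List Int)) : Decidable (Spec_combine_indexs idxs gap max_length out) := by unfold Spec_combine_indexs; infer_instance

def pvDiffWitness_combine_indexs : List Int × Int × Int := ([1, 2], 3, 2)
def pvDiffWitnessOut_combine_indexs : (List (List Int)) × (List (List Int)) := ([[1, 1], [2, 2]], [[1, 2]])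

-- ===== CLAIM (what is proved, stated in full; the proofs are below) =====
def Claim_unchanged_combine_indexs : Prop := ∀ (idxs : List Int) (gap : Int) (max_length : Int), Dom_combine_indexs idxs gap max_length → Spec_combine_indexs idxs gap max_length (combine_indexs idxs gap max_length)
def Claim_changed_combine_indexs : Prop := Dom_combine_indexs (pvDiffWitness_combine_indexs.1) (pvDiffWitness_combine_indexs.2.1) (pvDiffWitness_combine_indexs.2.2) ∧ D_combine_indexs (pvDiffWitness_combine_indexs.1) (pvDiffWitness_combine_indexs.2.1) (pvDiffWitness_combine_indexs.2.2) ∧ combine_indexs (pvDiffWitness_combine_indexs.1) (pvDiffWitness_combine_indexs.2.1) (pvDiffWitness_combine_indexs.2.2) = pvDiffWitnessOut_combine_indexs.1 ∧ combine_indexs_alt (pvDiffWitness_combine_indexs.1) (pvDiffWitness_combine_indexs.2.1) (pvDiffWitness_combine_indexs.2.2) = pvDiffWitnessOut_combine_indexs.2 ∧ pvDiffWitnessOut_combine_indexs.1 ≠ pvDiffWitnessOut_combine_indexs.2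
def Claim_exact_combine_indexs : Prop := ∀ (idxs : List Int) (gap : Int) (max_length : Int), Dom_combine_indexs idxs gap max_length → D_combine_indexs idxs gap max_length → combine_indexs idxs gap max_length ≠ combine_indexs_alt idxs gap max_length

-- ===== LEMMAS AND PROOFS =====

-- reference form of A: greedy run extraction
def pvTakeRun (gap max_length a : Int) : List Int → Int × List Int
  | [] => (a, [])
  | x :: xs => if 2 < max_length ∧ x - a < gap then pvTakeRun gap max_length x xs else (a, x :: xs)

theorem pvTakeRun_len (gap max_length a : Int) (xs : List Int) :
    (pvTakeRun gap max_length a xs).2.length ≤ xs.length := by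
  induction xs generalizing a with
  | nil => simp [pvTakeRun]
  | cons x xs ih =>
    simp only [pvTakeRun]
    split
    · exact le_trans (ih x) (Nat.le_succ _)
    · simp

def pvGo (gap max_length : Int) : List Int → List (List Int)
  | [] => []
  | x :: xs =>
    let p := pvTakeRun gap max_length x xs
    [x, p.1] :: pvGo gap max_length p.2
termination_by xs => xs.length
decreasing_by
  exact Nat.lt_succ_of_le (pvTakeRun_len gap max_length x xs)

-- reference form of B: greedy run extraction by gap only
def pvTakeRunB (gap a : Int) : List Int → Int × List Int
  | [] => (a, [])
  | x :: xs => if x - a < gap then pvTakeRunB gap x xs else (a, x :: xs)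

theorem pvTakeRunB_len (gap a : Int) (xs : List Int) :
    (pvTakeRunB gap a xs).2.length ≤ xs.length := by
  induction xs generalizing a with
  | nil => simp [pvTakeRunB]
  | cons x xs ih =>
    simp only [pvTakeRunB]
    split
    · exact le_trans (ih x) (Nat.le_succ _)
    · simp

def pvGoB (gap : Int) : List Int → List (List Int)
  | [] => []
  | x :: xs =>
    let p := pvTakeRunB gap x xs
    [x, p.1] :: pvGoB gap p.2
termination_by xs => xs.length
decreasing_by
  exact Nat.lt_succ_of_le (pvTakeRunB_len gap x xs)

theorem combine_indexs_eq_go_aux (gap max_length : Int) (xs : List Int)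
    (acc : List (List Int)) (a b : Int) :
    xs.foldl (fun res idx =>
      if res.length = 0 then
        res ++ [[idx, idx]]
      else
        let last := res.getLast?.getD []
        if (last.length : Int) < max_length ∧ idx - last.getLast?.getD 0 < gap then
          res.dropLast ++ [last.dropLast ++ [idx]]
        else
          res ++ [[idx, idx]]) (acc ++ [[a, b]])
    = acc ++ ([a, (pvTakeRun gap max_length b xs).1] ::
        pvGo gap max_length (pvTakeRun gap max_length b xs).2) := by
  induction xs generalizing acc a b with
  | nil => simp [pvTakeRun, pvGo]
  | cons x xs ih =>
    simp only [List.foldl_cons]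
    have hlen : (acc ++ [[a, b]]).length ≠ 0 := by simp
    have hlast : (acc ++ [[a, b]]).getLast?.getD [] = [a, b] := by
      simp
    by_cases hc : (2 : Int) < max_length ∧ x - b < gap
    · have : ((([a, b] : List Int).length : Int) < max_length ∧
          x - ([a, b] : List Int).getLast?.getD 0 < gap) := by
        simpa using hc
      simp only [if_neg hlen, hlast, if_pos this]
      have hd : (acc ++ [[a, b]]).dropLast ++ [([a, b] : List Int).dropLast ++ [x]]
          = acc ++ [[a, x]] := by simp
      rw [hd, ih]
      simp [pvTakeRun, hc]
    · have : ¬ ((([a, b] : List Int).length : Int) < max_length ∧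
          x - ([a, b] : List Int).getLast?.getD 0 < gap) := by
        simpa using hc
      simp only [if_neg hlen, hlast, if_neg this]
      rw [show (acc ++ [[a, b]]) ++ [[x, x]] = (acc ++ [[a, b]]) ++ [[x, x]] from rfl, ih]
      have ht : pvTakeRun gap max_length b (x :: xs) = (b, x :: xs) := by
        simp [pvTakeRun, hc]
      rw [ht]
      simp only [pvGo]
      simp

theorem combine_indexs_eq_go (idxs : List Int) (gap max_length : Int) :
    combine_indexs idxs gap max_length = pvGo gap max_length idxs := by
  cases idxs with
  | nil => simp [combine_indexs, pvGo]
  | cons x rest =>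
    unfold combine_indexs
    simp only [List.foldl_cons, List.length_nil, List.nil_append]
    have := combine_indexs_eq_go_aux gap max_length rest [] x x
    simpa [pvGo] using this

theorem alt_eq_goB (idxs : List Int) (gap max_length : Int) :
    combine_indexs_alt idxs gap max_length = pvGoB gap idxs := by
  induction idxs with
  | nil => simp [combine_indexs_alt, pvGoB]
  | cons x rest ih =>
    cases rest with
    | nil =>
      simp [combine_indexs_alt, pvGoB, pvTakeRunB]
    | cons y r =>
      by_cases hc : y - x < gap
      · -- merge: no break between x and y
        have hb : decide (y - x ≥ gap) = false := by
          simp only [decide_eq_false_iff_not]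
          omega
        have hgo : pvGoB gap (x :: y :: r)
            = [x, (pvTakeRunB gap y r).1] ::
              pvGoB gap (pvTakeRunB gap y r).2 := by
          simp only [pvGoB, pvTakeRunB, if_pos hc]
        have hgo' : pvGoB gap (y :: r)
            = [y, (pvTakeRunB gap y r).1] ::
              pvGoB gap (pvTakeRunB gap y r).2 := by
          simp only [pvGoB]
        rw [hgo]
        rw [hgo'] at ih
        simp only [combine_indexs_alt] at ih ⊢
        simp only [List.zip_cons_cons, List.map_cons, hb, List.filterMap_cons,
          List.cons_append, if_neg Bool.false_ne_true] at ih ⊢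
        cases hL :
            ((y :: r).zip ((((y :: r).zip r).map
              (fun p => decide (p.2 - p.1 ≥ gap))) ++ [true])).filterMap
              (fun p => if p.2 = true then some p.1 else none) with
        | nil => rw [hL] at ih; simp at ih
        | cons l0 L'' =>
          rw [hL] at ih
          simp only [List.zip_cons_cons, List.map_cons] at ih ⊢
          obtain ⟨h1, h2⟩ := List.cons_eq_cons.mp ih
          have hl0 : l0 = (pvTakeRunB gap y r).1 := by
            simpa using h1
          rw [hl0, h2]
      · -- break between x and y
        have hb : decide (y - x ≥ gap) = true := by
          simp only [decide_eq_true_eq]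
          omega
        have hgo : pvGoB gap (x :: y :: r)
            = [x, x] :: pvGoB gap (y :: r) := by
          have ht : pvTakeRunB gap x (y :: r) = (x, y :: r) := by
            simp [pvTakeRunB, hc]
          simp only [pvGoB, ht]
        rw [hgo, ← ih]
        simp only [combine_indexs_alt]
        have hb2 : decide (gap ≤ y - x) = true := by
          simp only [decide_eq_true_eq]
          omega
        simp [hb2]

-- with 2 < max_length, A's run extraction is exactly B's
theorem takeRun_eq_takeRunB (gap max_length : Int) (hm : 2 < max_length) (a : Int)
    (xs : List Int) : pvTakeRun gap max_length a xs = pvTakeRunB gap a xs := by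
  induction xs generalizing a with
  | nil => rfl
  | cons x xs ih =>
    simp only [pvTakeRun, pvTakeRunB]
    by_cases hc : x - a < gap
    · rw [if_pos ⟨hm, hc⟩, if_pos hc, ih]
    · rw [if_neg (by tauto), if_neg hc]

theorem go_eq_goB (gap max_length : Int) (hm : 2 < max_length) (xs : List Int) :
    pvGo gap max_length xs = pvGoB gap xs := by
  induction hn : xs.length using Nat.strong_induction_on generalizing xs with
  | _ n ih =>
    cases xs with
    | nil => simp [pvGo, pvGoB]
    | cons x rest =>
      simp only [pvGo, pvGoB, takeRun_eq_takeRunB gap max_length hm]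
      have hlt : (pvTakeRunB gap x rest).2.length < n := by
        have := pvTakeRunB_len gap x rest
        simp only [List.length_cons] at hn
        omega
      rw [ih _ hlt _ rfl]

-- when no adjacent pair is closer than gap, both reference forms give singletons
theorem takeRunB_far (gap a : Int) (xs : List Int)
    (h : ∀ p ∈ ((a :: xs).zip xs), ¬ (p.2 - p.1 < gap)) :
    pvTakeRunB gap a xs = (a, xs) := by
  cases xs with
  | nil => rfl
  | cons x r =>
    have hx : ¬ (x - a < gap) := h (a, x) (by simp)
    simp [pvTakeRunB, hx]

theorem takeRun_small (gap max_length a : Int) (hm : max_length ≤ 2) (xs : List Int) :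
    pvTakeRun gap max_length a xs = (a, xs) := by
  cases xs with
  | nil => rfl
  | cons x r => simp only [pvTakeRun]; rw [if_neg (by omega)]

theorem go_small (gap max_length : Int) (hm : max_length ≤ 2) (xs : List Int) :
    pvGo gap max_length xs = xs.map (fun x => [x, x]) := by
  induction xs with
  | nil => simp [pvGo]
  | cons x r ih =>
    simp only [pvGo, takeRun_small gap max_length x hm, List.map_cons, ih]

theorem goB_far (gap : Int) (xs : List Int)
    (h : ∀ p ∈ (xs.zip xs.tail), ¬ (p.2 - p.1 < gap)) :
    pvGoB gap xs = xs.map (fun x => [x, x]) := by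
  induction xs with
  | nil => simp [pvGoB]
  | cons x r ih =>
    have hr : pvTakeRunB gap x r = (x, r) := by
      apply takeRunB_far
      intro p hp
      exact h p (by simpa using hp)
    simp only [pvGoB, hr, List.map_cons]
    rw [ih]
    intro p hp
    apply h p
    cases r with
    | nil => simp at hp
    | cons y r' => simp only [List.tail_cons, List.zip_cons_cons]; exact List.mem_cons_of_mem _ hp

-- inside D_, B has strictly fewer groups than elements
theorem goB_len_le (gap : Int) (xs : List Int) : (pvGoB gap xs).length ≤ xs.length := by
  induction hn : xs.length using Nat.strong_induction_on generalizing xs with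
  | _ n ih =>
    cases xs with
    | nil => simp [pvGoB]
    | cons x rest =>
      simp only [pvGoB, List.length_cons]
      have hle := pvTakeRunB_len gap x rest
      have hlt : (pvTakeRunB gap x rest).2.length < n := by
        simp only [List.length_cons] at hn; omega
      have := ih _ hlt (pvTakeRunB gap x rest).2 rfl
      subst hn
      simp only [List.length_cons]
      omega

theorem goB_len_lt (gap : Int) (xs : List Int)
    (h : ∃ p ∈ (xs.zip xs.tail), p.2 - p.1 < gap) :
    (pvGoB gap xs).length < xs.length := by
  induction xs with
  | nil => simp at h
  | cons x rest ih =>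
    cases rest with
    | nil => simp at h
    | cons y r =>
      by_cases hc : y - x < gap
      · simp only [pvGoB, pvTakeRunB, if_pos hc, List.length_cons]
        have h1 := goB_len_le gap (pvTakeRunB gap y r).2
        have h2 := pvTakeRunB_len gap y r
        omega
      · have hy : pvTakeRunB gap x (y :: r) = (x, y :: r) := by
          simp [pvTakeRunB, hc]
        have hgo : pvGoB gap (x :: y :: r) = [x, x] :: pvGoB gap (y :: r) := by
          simp only [pvGoB, hy]
        rw [hgo]
        simp only [List.length_cons]
        have : ∃ p ∈ ((y :: r).zip (y :: r).tail), p.2 - p.1 < gap := by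
          obtain ⟨p, hp, hpl⟩ := h
          simp only [List.tail_cons, List.zip_cons_cons, List.mem_cons] at hp
          rcases hp with rfl | hp
          · exact absurd hpl hc
          · exact ⟨p, by simpa using hp, hpl⟩
        have hih := ih this
        simp only [List.length_cons] at hih
        omega

-- ===== VERDICT (by name: the statements are the Claim_ definitions above) =====
theorem combine_indexs_spec : Claim_unchanged_combine_indexs := by
  intro idxs gap max_length _ hD
  unfold D_combine_indexs at hD
  rw [combine_indexs_eq_go, alt_eq_goB]
  by_cases hm : 2 < max_length
  · exact go_eq_goB gap max_length hm idxs
  · have hA : ((idxs.zip idxs.tail).any (fun p => decide (p.2 - p.1 < gap))) = false := by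
      by_cases h : ((idxs.zip idxs.tail).any (fun p => decide (p.2 - p.1 < gap))) = true
      · exact absurd ⟨by omega, h⟩ hD
      · simpa using h
    have hfar : ∀ p ∈ (idxs.zip idxs.tail), ¬ (p.2 - p.1 < gap) := by
      intro p hp hc
      rw [List.any_eq_false] at hA
      have h2 := hA p hp
      simp only [decide_eq_true_eq] at h2
      exact h2 hc
    rw [go_small gap max_length (by omega), goB_far gap idxs hfar]

theorem combine_indexs_changed : Claim_changed_combine_indexs := by
  unfold Claim_changed_combine_indexs; decide

theorem combine_indexs_tight : Claim_exact_combine_indexs := by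
  intro idxs gap max_length _ hD h
  obtain ⟨hm, hany⟩ := hD
  rw [combine_indexs_eq_go, alt_eq_goB, go_small gap max_length hm] at h
  have hlt : (pvGoB gap idxs).length < idxs.length := by
    apply goB_len_lt
    rw [List.any_eq_true] at hany
    obtain ⟨p, hp, hpl⟩ := hany
    exact ⟨p, hp, by simpa using hpl⟩
  rw [← h] at hlt
  simp at hlt
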